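-- pv_equiv track=rewrite | github.com/Aasthaengg/IBMdataset | Python_codes/p03147/s996115923.py | solve
-- ===== SOURCE A (Python) =====
-- def solve(n,a):
--   h_max = max(a)
--   res = 0
--
--   for h in range(h_max):
--     flag = 0 #一つ前に水をやる必要があるかどうか
--
--     for i in range(n):
--       if a[i] > h and not flag:
--         res += 1
--         flag = 1
--       elif a[i] <= h:
--         flag = 0
--
--   return res
-- ===== SOURCE B (Python) =====
-- def solve(n, a):
--     # one pass: total waterings = sum of positive rises of the clamped height profile
--     res = 0
--     prev = 0
--     for i in range(n):
--         cur = a[i] if a[i] > 0 else 0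
--         if cur > prev:
--             res += cur - prev
--         prev = cur
--     return res
-- ===== Notes on version B (the rewrite author's own statement) =====
-- stated objective: faster
-- what changed: A sweeps every height level 0..max(a)-1 and counts maximal runs of still-too-short flowers per level; B makes a single pass over the first n heights and sums the positive rises of the (clamped-at-0) height profile, a telescoping closed form of A's double loop.
-- outside the precondition, e.g. on solve(2, [-1]): A returns 0, B raises IndexError
import Mathlib
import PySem

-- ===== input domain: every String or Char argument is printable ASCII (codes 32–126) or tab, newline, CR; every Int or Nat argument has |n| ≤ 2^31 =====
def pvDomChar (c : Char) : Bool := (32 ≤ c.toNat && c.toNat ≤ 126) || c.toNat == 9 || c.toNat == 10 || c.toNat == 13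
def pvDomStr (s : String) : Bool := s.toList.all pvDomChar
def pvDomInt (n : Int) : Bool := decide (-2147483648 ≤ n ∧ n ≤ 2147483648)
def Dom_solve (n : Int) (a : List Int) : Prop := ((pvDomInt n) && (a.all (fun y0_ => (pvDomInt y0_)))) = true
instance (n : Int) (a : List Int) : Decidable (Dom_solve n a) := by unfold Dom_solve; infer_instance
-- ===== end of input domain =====

-- B replaces A's per-height-level sweep by a single pass summing positive rises of the clamped height profile (objective: faster, asymptotic).


-- ===== PORT A =====
-- body of A's inner loop: state (res, flag), element a[i]
def stepA (h : Int) (p : Int × Int) (x : Int) : Int × Int :=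
  if x > h ∧ p.2 = 0 then (p.1 + 1, 1)
  else if x ≤ h then (p.1, 0)
  else p

def solve (n : Int) (a : List Int) : Int :=
  let h_max := (PySem.List.max? a (fun x => x)).getD 0
  (PySem.List.pyRange 0 h_max 1).foldl
    (fun res h =>
      ((PySem.List.pyRange 0 n 1).foldl
        (fun p i => stepA h p (PySem.List.pyGetD a i 0)) (res, 0)).1)
    0

-- ===== PORT B =====
-- body of B's single loop: state (res, prev), element a[i]
def stepB (p : Int × Int) (x : Int) : Int × Int :=
  let cur := if x > 0 then x else 0
  (if cur > p.2 then p.1 + (cur - p.2) else p.1, cur)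

def solve_alt (n : Int) (a : List Int) : Int :=
  ((PySem.List.pyRange 0 n 1).foldl
    (fun p i => stepB p (PySem.List.pyGetD a i 0)) ((0 : Int), (0 : Int))).1

-- ===== PRECONDITION & SPEC =====
-- Pre_ excludes a = [] (A's max(a) raises ValueError) and n > len(a) (A's a[i] raises
-- IndexError whenever the height loop runs; when it does not run — all heights ≤ 0 —
-- A happens to return 0 but B's own a[i] access raises, see cites).
def Pre_solve (n : Int) (a : List Int) : Prop := a ≠ [] ∧ n ≤ (a.length : Int)
instance (n : Int) (a : List Int) : Decidable (Pre_solve n a) := by unfold Pre_solve; infer_instance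
def pvWitness_solve : Int × List Int := (3, [1, 3, 2])

def Spec_solve (n : Int) (a : List Int) (out : Int) : Prop := out = solve_alt n a
instance (n : Int) (a : List Int) (out : Int) : Decidable (Spec_solve n a out) := by unfold Spec_solve; infer_instance

-- ===== CLAIM (what is proved, stated in full; the proofs are below) =====
def Claim_equal_solve : Prop := ∀ (n : Int) (a : List Int), Dom_solve n a → Pre_solve n a → Spec_solve n a (solve n a)

-- ===== LEMMAS AND PROOFS =====

-- the running result of A's inner loop starting from flag fl
def rowA (h : Int) (fl : Int) (xs : List Int) : Int := (xs.foldl (stepA h) (0, fl)).1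

theorem foldlA_carry (h : Int) (xs : List Int) (r fl : Int) :
    xs.foldl (stepA h) (r, fl)
      = (r + (xs.foldl (stepA h) (0, fl)).1, (xs.foldl (stepA h) (0, fl)).2) := by
  induction xs generalizing r fl with
  | nil => simp
  | cons x t ih =>
    have hs : ∀ r : Int, stepA h (r, fl) x
        = (r + (stepA h (0, fl) x).1, (stepA h (0, fl) x).2) := by
      intro r; simp only [stepA]; split_ifs <;> simp
    simp only [List.foldl_cons]
    rw [hs, ih, hs 0]
    rcases stepA h (0, fl) x with ⟨d, fl'⟩
    simp [ih d fl', add_assoc]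

theorem foldlB_carry (xs : List Int) (r p : Int) :
    xs.foldl stepB (r, p)
      = (r + (xs.foldl stepB (0, p)).1, (xs.foldl stepB (0, p)).2) := by
  induction xs generalizing r p with
  | nil => simp
  | cons x t ih =>
    have hs : ∀ r : Int, stepB (r, p) x
        = (r + (stepB (0, p) x).1, (stepB (0, p) x).2) := by
      intro r; simp only [stepB]; split_ifs <;> simp
    simp only [List.foldl_cons]
    rw [hs, ih, hs 0]
    rcases stepB (0, p) x with ⟨d, p'⟩
    simp [ih d p', add_assoc]

theorem rowA_cons (h prev x : Int) (xs : List Int) :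
    rowA h (if prev ≤ h then 0 else 1) (x :: xs)
      = (if prev ≤ h ∧ h < x then 1 else 0) + rowA h (if x ≤ h then 0 else 1) xs := by
  simp only [rowA, List.foldl_cons]
  have hstep : stepA h (0, if prev ≤ h then 0 else 1) x
      = ((if prev ≤ h ∧ h < x then 1 else 0), (if x ≤ h then 0 else 1)) := by
    simp only [stepA]; split_ifs <;> simp_all
    omega
  rw [hstep, foldlA_carry]

theorem count_range (x p : Int) (k : Nat) :
    ((PySem.List.pyRange 0 (k : Int) 1).map
        (fun h => if p ≤ h ∧ h < x then (1 : Int) else 0)).sum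
      = max 0 (min x (k : Int) - max p 0) := by
  induction k with
  | zero =>
    rw [PySem.List.pyRange_one_eq_nil (by simp)]
    simp
  | succ k ih =>
    have : ((k + 1 : Nat) : Int) = (k : Int) + 1 := by push_cast; ring
    rw [this, PySem.List.pyRange_one_succ_right (by positivity)]
    simp only [List.map_append, List.sum_append, List.map_cons, List.map_nil,
      List.sum_cons, List.sum_nil, ih]
    split_ifs <;> omega

theorem foldB_nonpos (xs : List Int) (hx : ∀ x ∈ xs, x ≤ 0) (r : Int) :
    xs.foldl stepB (r, 0) = (r, 0) := by
  induction xs with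
  | nil => rfl
  | cons x t ih =>
    have hx0 : x ≤ 0 := hx x (by simp)
    have : stepB (r, 0) x = (r, 0) := by
      simp only [stepB]
      have : ¬ x > 0 := by omega
      simp [this]
    simp only [List.foldl_cons, this]
    exact ih (fun y hy => hx y (by simp [hy]))

theorem main_sum (m : Int) (hm : 0 ≤ m) (xs : List Int) :
    ∀ prev : Int, prev ≤ m → (∀ x ∈ xs, x ≤ m) →
      (PySem.List.pyRange 0 m 1).foldl
          (fun r h => r + rowA h (if prev ≤ h then 0 else 1) xs) 0
        = (xs.foldl stepB (0, max 0 prev)).1 := by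
  induction xs with
  | nil =>
    intro prev _ _
    rw [PySem.List.foldl_congr_mem' (PySem.List.pyRange 0 m 1) _
      (fun (r : Int) (_ : Int) => r) 0 (by intro h _ r; simp [rowA])]
    rw [PySem.List.foldl_ignore]
    rfl
  | cons x t ih =>
    intro prev hp hx
    have hxm : x ≤ m := hx x (by simp)
    rw [PySem.List.foldl_congr_mem' (PySem.List.pyRange 0 m 1) _
      (fun (r h : Int) => r + ((if prev ≤ h ∧ h < x then (1 : Int) else 0)
        + rowA h (if x ≤ h then 0 else 1) t)) 0
      (by intro h _ r; rw [rowA_cons])]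
    rw [PySem.List.foldl_add (PySem.List.pyRange 0 m 1)
      (fun h => (if prev ≤ h ∧ h < x then (1 : Int) else 0)
        + rowA h (if x ≤ h then 0 else 1) t) 0]
    rw [PySem.List.sum_map_add_int]
    have hmk : ((m.toNat : Nat) : Int) = m := Int.toNat_of_nonneg hm
    have hcount : ((PySem.List.pyRange 0 m 1).map
        (fun h => if prev ≤ h ∧ h < x then (1 : Int) else 0)).sum
        = max 0 (min x m - max prev 0) := by
      rw [← hmk, count_range]
    have h2 : ((PySem.List.pyRange 0 m 1).map
        (fun h => rowA h (if x ≤ h then 0 else 1) t)).sum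
        = (t.foldl stepB (0, max 0 x)).1 := by
      have h3 := ih x hxm (fun y hy => hx y (by simp [hy]))
      rw [PySem.List.foldl_add (PySem.List.pyRange 0 m 1)
        (fun h => rowA h (if x ≤ h then 0 else 1) t) 0] at h3
      simpa using h3
    rw [hcount, h2]
    simp only [List.foldl_cons]
    have hstep : stepB (0, max 0 prev) x
        = ((if (max 0 x) > max 0 prev then (max 0 x) - max 0 prev else 0), max 0 x) := by
      simp only [stepB]
      have hcur : (if x > 0 then x else 0) = max 0 x := by split_ifs <;> omega
      rw [hcur]
      split_ifs <;> simp
    rw [hstep, foldlB_carry t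
      (if (max 0 x) > max 0 prev then (max 0 x) - max 0 prev else 0) (max 0 x)]
    have : min x m = x := min_eq_left hxm
    rw [this]
    split_ifs <;> omega

-- ===== VERDICT (by name: the statement is the Claim_ definition above) =====
theorem solve_spec : Claim_equal_solve := by
  intro n a _hdom hpre
  obtain ⟨hne, hlen⟩ := hpre
  obtain ⟨m, hm⟩ : ∃ m, PySem.List.max? a (fun y => y) = some m := by
    cases h : PySem.List.max? a (fun y => y) with
    | none => exact absurd ((PySem.List.max?_eq_none_iff a (fun y => y)).mp h) hne
    | some m => exact ⟨m, rfl⟩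
  have hmax : ∀ y ∈ a, y ≤ m := PySem.List.max?_isMax hm
  unfold Spec_solve solve solve_alt
  rw [hm]
  simp only [Option.getD_some]
  have hfoldA : ∀ (res h : Int),
      (PySem.List.pyRange 0 n 1).foldl
          (fun p i => stepA h p (PySem.List.pyGetD a i 0)) (res, 0)
        = ((PySem.List.pyRange 0 n 1).map
            (fun i => PySem.List.pyGetD a i 0)).foldl (stepA h) (res, 0) := by
    intro res h; rw [List.foldl_map]
  have hfoldB :
      (PySem.List.pyRange 0 n 1).foldl
          (fun p i => stepB p (PySem.List.pyGetD a i 0)) ((0 : Int), (0 : Int))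
        = ((PySem.List.pyRange 0 n 1).map
            (fun i => PySem.List.pyGetD a i 0)).foldl stepB (0, 0) := by
    rw [List.foldl_map]
  set ys := (PySem.List.pyRange 0 n 1).map (fun i => PySem.List.pyGetD a i 0) with hys
  have hysle : ∀ y ∈ ys, y ≤ m := by
    intro y hy
    rw [hys] at hy
    obtain ⟨i, hi, rfl⟩ := List.mem_map.mp hy
    obtain ⟨h0, hin⟩ := PySem.List.mem_pyRange_one.mp hi
    have hlt : i < (a.length : Int) := lt_of_lt_of_le hin hlen
    rw [PySem.List.pyGetD_eq_getElem a 0 h0 hlt]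
    exact hmax _ (List.getElem_mem _)
  rw [hfoldB]
  rcases le_or_gt m 0 with hm0 | hm0
  · rw [PySem.List.pyRange_one_eq_nil hm0]
    rw [foldB_nonpos ys (fun y hy => le_trans (hysle y hy) hm0) 0]
    rfl
  · have hcarry : ∀ (res h : Int), 0 ≤ h →
        ((PySem.List.pyRange 0 n 1).foldl
            (fun p i => stepA h p (PySem.List.pyGetD a i 0)) (res, 0)).1
          = res + rowA h (if (0 : Int) ≤ h then 0 else 1) ys := by
      intro res h h0
      rw [hfoldA, foldlA_carry]
      simp [rowA, h0]
    rw [PySem.List.foldl_congr_mem' (PySem.List.pyRange 0 m 1) _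
      (fun (res h : Int) => res + rowA h (if (0 : Int) ≤ h then 0 else 1) ys) 0
      (by intro h hmem res; rw [hcarry res h (PySem.List.mem_pyRange_one.mp hmem).1])]
    rw [main_sum m (le_of_lt hm0) ys 0 (le_of_lt hm0) hysle]
    simp
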